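-- pv_equiv track=rewrite | github.com/mobiusklein/glycresoft | glycan_profiling/tandem/glycopeptide/dynamic_generation/searcher.py | workload_grouping
-- ===== SOURCE A (Python) =====
-- def workload_grouping(chunks, max_scans_per_workload=500, starting_index=0):
--     workload = []
--     total_scans_in_workload = 0
--     i = starting_index
--     n = len(chunks)
--     while total_scans_in_workload < max_scans_per_workload and i < n:
--         chunk = chunks[i]
--         workload.append(chunk)
--         total_scans_in_workload += len(chunk)
--         i += 1
--     return workload, i
-- ===== SOURCE B (Python) =====
-- def _bisect_left(a, x):
--     # plain binary search (no imports, matching bisect.bisect_left on a sorted list)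
--     lo, hi = 0, len(a)
--     while lo < hi:
--         mid = (lo + hi) // 2
--         if a[mid] < x:
--             lo = mid + 1
--         else:
--             hi = mid
--     return lo
--
--
-- def workload_grouping(chunks, max_scans_per_workload=500, starting_index=0):
--     window = chunks[starting_index:]
--     prefix = [0]
--     total = 0
--     for chunk in window:
--         total += len(chunk)
--         prefix.append(total)
--     m = min(_bisect_left(prefix, max_scans_per_workload), len(window))
--     return window[:m], starting_index + m
-- ===== Notes on version B (the rewrite author's own statement) =====
-- stated objective: alternative
-- what changed: Replaces the inline accumulate-and-compare while loop with a precomputed prefix-sum table over chunks[starting_index:] plus a binary-search (bisect_left) cutoff, returning the slice window[:m] and starting_index+m.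
-- intended difference: For -len(chunks) <= starting_index < 0 with the tail from starting_index summing below max_scans_per_workload, A wraps past the end via Python negative indexing and re-appends chunks from the front (returning duplicated chunks and a positive index), while B stops at the end of the list, the intended cursor semantics. — e.g. on workload_grouping([[1]], 2, -1): A returns ([[1], [1]], 1), B returns ([[1]], 0)
import Mathlib
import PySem

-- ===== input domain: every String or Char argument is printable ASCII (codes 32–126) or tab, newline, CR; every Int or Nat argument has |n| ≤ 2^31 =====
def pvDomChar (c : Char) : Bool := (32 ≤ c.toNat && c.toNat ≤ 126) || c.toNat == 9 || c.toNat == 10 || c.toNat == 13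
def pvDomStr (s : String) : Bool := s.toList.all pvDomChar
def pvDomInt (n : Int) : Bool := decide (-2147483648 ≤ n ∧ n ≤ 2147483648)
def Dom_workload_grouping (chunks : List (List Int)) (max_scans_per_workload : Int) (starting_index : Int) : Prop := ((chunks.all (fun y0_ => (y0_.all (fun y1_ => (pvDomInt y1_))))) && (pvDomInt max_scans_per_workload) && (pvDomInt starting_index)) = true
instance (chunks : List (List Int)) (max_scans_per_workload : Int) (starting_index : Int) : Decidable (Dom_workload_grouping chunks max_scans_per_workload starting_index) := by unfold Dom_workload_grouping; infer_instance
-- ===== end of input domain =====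

-- B replaces A's accumulate-and-compare while loop by a prefix-sum table over chunks[starting_index:]
-- plus a binary-search cutoff (objective: alternative decomposition, not claimed faster).

-- ===== PORT A =====
-- while total < max and i < n: append chunks[i]; total += len(chunk); i += 1
-- (fuel = (n - i).toNat only bounds the iteration count; at fuel 0 the guard i < n is false anyway)
def wgLoop (chunks : List (List Int)) (maxS n : Int) : Nat → List (List Int) → Int → Int → List (List Int) × Int
  | 0, workload, _total, i => (workload, i)
  | fuel+1, workload, total, i =>
    if total < maxS ∧ i < n then
      match PySem.List.pyGet? chunks i with
      | some chunk => wgLoop chunks maxS n fuel (workload ++ [chunk]) (total + (chunk.length : Int)) (i + 1)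
      | none => (workload, i)   -- IndexError in Python; excluded by Pre_
    else (workload, i)

def workload_grouping (chunks : List (List Int)) (max_scans_per_workload : Int) (starting_index : Int) : List (List Int) × Int :=
  wgLoop chunks max_scans_per_workload (chunks.length : Int)
    (((chunks.length : Int) - starting_index).toNat) [] 0 starting_index

-- ===== PORT B =====
-- prefix = [0]; total = 0; for chunk in window: total += len(chunk); prefix.append(total)
def wgPrefixStep (st : List Int × Int) (chunk : List Int) : List Int × Int :=
  (st.1 ++ [st.2 + (chunk.length : Int)], st.2 + (chunk.length : Int))

-- Source B's hand-written _bisect_left(lo,hi while-loop) is exactly PySem.List.bisectLeft's loop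
def workload_grouping_alt (chunks : List (List Int)) (max_scans_per_workload : Int) (starting_index : Int) : List (List Int) × Int :=
  let window := PySem.List.slice chunks (some starting_index) none
  let st := window.foldl wgPrefixStep ([0], 0)
  let m := min (PySem.List.bisectLeft st.1 max_scans_per_workload) window.length
  (window.take m, starting_index + (m : Int))

-- ===== PRECONDITION & SPEC =====
-- total length of the Int-lists in w (used by D_ below and by the proofs)
def sumLen (w : List (List Int)) : Int := (w.map (fun c => (c.length : Int))).sum

-- Pre_ excludes exactly the inputs where A raises IndexError: starting_index < -len(chunks) with a positive threshold.
def Pre_workload_grouping (chunks : List (List Int)) (max_scans_per_workload : Int) (starting_index : Int) : Prop :=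
  ¬ (starting_index < -(chunks.length : Int) ∧ 0 < max_scans_per_workload)
instance (chunks : List (List Int)) (max_scans_per_workload : Int) (starting_index : Int) : Decidable (Pre_workload_grouping chunks max_scans_per_workload starting_index) := by unfold Pre_workload_grouping; infer_instance

def pvWitness_workload_grouping : List (List Int) × Int × Int := ([[1], [2, 3]], 2, 0)

-- For -len(chunks) ≤ starting_index < 0 with the tail from starting_index summing below
-- max_scans_per_workload, A wraps past the end via Python negative indexing and re-appends chunks
-- from the front (duplicated chunks, positive index), while B stops at the end of the list,
-- the intended cursor semantics.
def D_workload_grouping (chunks : List (List Int)) (max_scans_per_workload : Int) (starting_index : Int) : Prop :=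
  -(chunks.length : Int) ≤ starting_index ∧ starting_index < 0 ∧
    sumLen (chunks.drop (((chunks.length : Int) + starting_index).toNat)) < max_scans_per_workload
instance (chunks : List (List Int)) (max_scans_per_workload : Int) (starting_index : Int) : Decidable (D_workload_grouping chunks max_scans_per_workload starting_index) := by unfold D_workload_grouping; infer_instance

def Spec_workload_grouping (chunks : List (List Int)) (max_scans_per_workload : Int) (starting_index : Int) (out : List (List Int) × Int) : Prop :=
  ¬ D_workload_grouping chunks max_scans_per_workload starting_index → out = workload_grouping_alt chunks max_scans_per_workload starting_index
instance (chunks : List (List Int)) (max_scans_per_workload : Int) (starting_index : Int) (out : List (List Int) × Int) : Decidable (Spec_workload_grouping chunks max_scans_per_workload starting_index out) := by unfold Spec_workload_grouping; infer_instance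

def pvDiffWitness_workload_grouping : List (List Int) × Int × Int := ([[1]], 2, -1)
def pvDiffWitnessOut_workload_grouping : (List (List Int) × Int) × (List (List Int) × Int) := (([[1], [1]], 1), ([[1]], 0))

-- ===== CLAIM (what is proved, stated in full; the proofs are below) =====
def Claim_unchanged_workload_grouping : Prop := ∀ (chunks : List (List Int)) (max_scans_per_workload : Int) (starting_index : Int), Dom_workload_grouping chunks max_scans_per_workload starting_index → Pre_workload_grouping chunks max_scans_per_workload starting_index → Spec_workload_grouping chunks max_scans_per_workload starting_index (workload_grouping chunks max_scans_per_workload starting_index)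
def Claim_changed_workload_grouping : Prop := Dom_workload_grouping (pvDiffWitness_workload_grouping.1) (pvDiffWitness_workload_grouping.2.1) (pvDiffWitness_workload_grouping.2.2) ∧ Pre_workload_grouping (pvDiffWitness_workload_grouping.1) (pvDiffWitness_workload_grouping.2.1) (pvDiffWitness_workload_grouping.2.2) ∧ D_workload_grouping (pvDiffWitness_workload_grouping.1) (pvDiffWitness_workload_grouping.2.1) (pvDiffWitness_workload_grouping.2.2) ∧ workload_grouping (pvDiffWitness_workload_grouping.1) (pvDiffWitness_workload_grouping.2.1) (pvDiffWitness_workload_grouping.2.2) = pvDiffWitnessOut_workload_grouping.1 ∧ workload_grouping_alt (pvDiffWitness_workload_grouping.1) (pvDiffWitness_workload_grouping.2.1) (pvDiffWitness_workload_grouping.2.2) = pvDiffWitnessOut_workload_grouping.2 ∧ pvDiffWitnessOut_workload_grouping.1 ≠ pvDiffWitnessOut_workload_grouping.2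
def Claim_exact_workload_grouping : Prop := ∀ (chunks : List (List Int)) (max_scans_per_workload : Int) (starting_index : Int), Dom_workload_grouping chunks max_scans_per_workload starting_index → Pre_workload_grouping chunks max_scans_per_workload starting_index → D_workload_grouping chunks max_scans_per_workload starting_index → workload_grouping chunks max_scans_per_workload starting_index ≠ workload_grouping_alt chunks max_scans_per_workload starting_index

-- ===== LEMMAS AND PROOFS =====

-- the number of chunks both programs take from the window w at remaining budget r
def mCount : List (List Int) → Int → Nat
  | [], _ => 0
  | c :: w', r => if r ≤ 0 then 0 else mCount w' (r - (c.length : Int)) + 1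

lemma sumLen_nil : sumLen [] = 0 := rfl
lemma sumLen_cons (c : List Int) (w : List (List Int)) : sumLen (c :: w) = (c.length : Int) + sumLen w := by
  simp [sumLen]
lemma sumLen_append (a b : List (List Int)) : sumLen (a ++ b) = sumLen a + sumLen b := by
  simp [sumLen]
lemma sumLen_nonneg (w : List (List Int)) : 0 ≤ sumLen w := by
  induction w with
  | nil => simp [sumLen]
  | cons c w ih => rw [sumLen_cons]; positivity

lemma sumLen_take_mono (w : List (List Int)) {i j : Nat} (h : i ≤ j) :
    sumLen (w.take i) ≤ sumLen (w.take j) := by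
  have hsplit : w.take j = w.take i ++ (w.take j).drop i := by
    conv_lhs => rw [← List.take_append_drop i (w.take j)]
    rw [List.take_take, Nat.min_eq_left h]
  rw [hsplit, sumLen_append]
  have := sumLen_nonneg ((w.take j).drop i)
  omega

lemma mCount_le (w : List (List Int)) (r : Int) : mCount w r ≤ w.length := by
  induction w generalizing r with
  | nil => simp [mCount]
  | cons c w ih =>
    simp only [mCount, List.length_cons]
    split
    · omega
    · have := ih (r - (c.length : Int)); omega

lemma mCount_nonpos (w : List (List Int)) {r : Int} (h : r ≤ 0) : mCount w r = 0 := by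
  cases w <;> simp [mCount, h]

lemma mCount_prefix_lt (w : List (List Int)) (r : Int) :
    ∀ j : Nat, j < mCount w r → sumLen (w.take j) < r := by
  induction w generalizing r with
  | nil => simp [mCount]
  | cons c w ih =>
    intro j hj
    simp only [mCount] at hj
    split at hj
    · omega
    · rename_i hr
      cases j with
      | zero => simp [sumLen_nil]; omega
      | succ k =>
        have := ih (r - (c.length : Int)) k (by omega)
        simp only [List.take_succ_cons, sumLen_cons]
        omega

lemma mCount_stop (w : List (List Int)) (r : Int) (h : mCount w r < w.length) :
    r ≤ sumLen (w.take (mCount w r)) := by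
  induction w generalizing r with
  | nil => simp [mCount] at h
  | cons c w ih =>
    simp only [mCount, List.length_cons] at h ⊢
    split at h
    · rename_i hr; simp [sumLen_nil, hr]
    · rename_i hr
      have := ih (r - (c.length : Int)) (by omega)
      rw [if_neg hr]
      simp only [List.take_succ_cons, sumLen_cons]
      omega

lemma mCount_full (w : List (List Int)) {r : Int} (h : sumLen w < r) : mCount w r = w.length := by
  induction w generalizing r with
  | nil => simp [mCount]
  | cons c w ih =>
    have h0 := sumLen_nonneg (c :: w)
    rw [sumLen_cons] at h
    have hw := sumLen_nonneg w
    simp only [mCount, List.length_cons]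
    rw [if_neg (by omega)]
    rw [ih (by omega)]

-- the prefix list built by B's fold
lemma foldl_wgPrefix (w : List (List Int)) : ∀ (p : List Int) (t : Int),
    w.foldl wgPrefixStep (p, t) =
      (p ++ (List.range w.length).map (fun k => t + sumLen (w.take (k+1))), t + sumLen w) := by
  induction w with
  | nil => intro p t; simp [sumLen_nil]
  | cons c w ih =>
    intro p t
    simp only [List.foldl_cons, wgPrefixStep]
    rw [ih]
    simp only [List.length_cons, List.range_succ_eq_map, List.map_cons, List.map_map]
    simp only [Prod.mk.injEq]
    refine ⟨?_, by rw [sumLen_cons]; ring⟩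
    have hmap : List.map ((fun k => t + sumLen (List.take (k+1) (c :: w))) ∘ Nat.succ) (List.range w.length)
        = List.map (fun k => t + (c.length : Int) + sumLen (List.take (k+1) w)) (List.range w.length) :=
      List.map_congr_left (by
        intro k _
        simp [Function.comp, List.take_succ_cons, sumLen_cons]
        ring)
    rw [hmap, List.append_assoc]
    simp [List.take_succ_cons, sumLen_cons, sumLen_nil]

lemma prefix_eq (w : List (List Int)) :
    (w.foldl wgPrefixStep ([0], 0)).1 =
      (List.range (w.length + 1)).map (fun k => sumLen (w.take k)) := by
  rw [foldl_wgPrefix]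
  simp only [List.range_succ_eq_map, List.map_cons, List.map_map]
  simp [Function.comp, sumLen_nil]

lemma prefix_sorted (w : List (List Int)) :
    ((List.range (w.length + 1)).map (fun k => sumLen (w.take k))).Pairwise (· ≤ ·) := by
  exact List.Pairwise.map _ (fun a b hab => sumLen_take_mono w (Nat.le_of_lt hab)) List.pairwise_lt_range

lemma min_bisect_eq_mCount (w : List (List Int)) (maxS : Int) :
    min (PySem.List.bisectLeft ((List.range (w.length + 1)).map (fun k => sumLen (w.take k))) maxS) w.length
      = mCount w maxS := by
  set p := (List.range (w.length + 1)).map (fun k => sumLen (w.take k)) with hp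
  have hlen : p.length = w.length + 1 := by simp [hp]
  have hget : ∀ (j : Nat) (hj : j < p.length), p[j] = sumLen (w.take j) := by
    intro j hj
    simp [hp]
  obtain ⟨hb1, hb2, hb3⟩ := PySem.List.bisectLeft_spec p maxS (prefix_sorted w)
  set b := PySem.List.bisectLeft p maxS with hbdef
  have hmle : mCount w maxS ≤ w.length := mCount_le w maxS
  rcases Nat.lt_trichotomy (min b w.length) (mCount w maxS) with hlt | heq | hgt
  · exfalso
    have hminb : min b w.length < w.length := by omega
    have hbm : min b w.length = b := by omega
    have hjb : b < p.length := by omega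
    have h3 := hb3 b hjb (by omega)
    rw [hget _ hjb] at h3
    have h2 := mCount_prefix_lt w maxS b (by omega)
    omega
  · exact heq
  · exfalso
    have hmn : mCount w maxS < w.length := by omega
    have hst := mCount_stop w maxS hmn
    have hjm : mCount w maxS < p.length := by omega
    have h2 := hb2 (mCount w maxS) hjm (by omega)
    rw [hget _ hjm] at h2
    omega

-- closed form for B: window, cutoff mCount
lemma alt_eq (chunks : List (List Int)) (maxS s : Int) :
    workload_grouping_alt chunks maxS s =
      ((PySem.List.slice chunks (some s) none).take (mCount (PySem.List.slice chunks (some s) none) maxS),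
        s + (mCount (PySem.List.slice chunks (some s) none) maxS : Int)) := by
  simp only [workload_grouping_alt]
  rw [prefix_eq, min_bisect_eq_mCount]

-- A's loop computes the same cutoff over a window w of chunks starting at position i
lemma wgLoop_eq (chunks : List (List Int)) (maxS n : Int) (w : List (List Int)) :
    ∀ (fuel : Nat) (acc : List (List Int)) (t i : Int),
    w.length ≤ fuel →
    (∀ (k : Nat), (hk : k < w.length) → PySem.List.pyGet? chunks (i + (k : Int)) = some w[k]) →
    (i + (w.length : Int) = n ∨ (maxS ≤ t + sumLen w ∧ i + (w.length : Int) ≤ 0 ∧ 0 < n)) →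
    wgLoop chunks maxS n fuel acc t i =
      (acc ++ w.take (mCount w (maxS - t)), i + (mCount w (maxS - t) : Int)) := by
  induction w with
  | nil =>
    intro fuel acc t i _ _ hstop
    have hguard : ¬ (t < maxS ∧ i < n) := by
      rcases hstop with h | ⟨h1, _, _⟩
      · simp at h; omega
      · rw [sumLen_nil] at h1; omega
    cases fuel <;> simp [wgLoop, mCount, hguard]
  | cons c w ih =>
    intro fuel acc t i hf hget hstop
    by_cases hr : maxS ≤ t
    · have hguard : ¬ (t < maxS ∧ i < n) := by omega
      have : mCount (c :: w) (maxS - t) = 0 := mCount_nonpos _ (by omega)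
      cases fuel <;> simp [wgLoop, hguard, this]
    · have hin : i < n := by
        rcases hstop with h | ⟨_, h2, h3⟩
        · simp only [List.length_cons] at h; push_cast at h; omega
        · simp only [List.length_cons] at h2; push_cast at h2; omega
      obtain ⟨fuel, rfl⟩ : ∃ f, fuel = f + 1 := by
        cases fuel with
        | zero => simp at hf
        | succ f => exact ⟨f, rfl⟩
      have hc : PySem.List.pyGet? chunks i = some c := by
        have := hget 0 (by simp)
        simpa using this
      rw [wgLoop, if_pos ⟨by omega, hin⟩, hc]
      show wgLoop chunks maxS n fuel (acc ++ [c]) (t + (c.length : Int)) (i + 1) = _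
      rw [ih fuel (acc ++ [c]) (t + (c.length : Int)) (i + 1)
        (by simp at hf ⊢; omega)
        (by
          intro k hk
          have := hget (k + 1) (by simp; omega)
          push_cast at this ⊢
          rw [show i + 1 + (k : Int) = i + ((k : Int) + 1) by ring]
          simpa using this)
        (by
          rcases hstop with h | ⟨h1, h2, h3⟩
          · left; simp only [List.length_cons] at h; push_cast at h ⊢; omega
          · right
            rw [sumLen_cons] at h1
            simp only [List.length_cons] at h2
            push_cast at h2 ⊢
            exact ⟨by omega, by omega, h3⟩)]
      have hmc : mCount (c :: w) (maxS - t) = mCount w (maxS - (t + (c.length : Int))) + 1 := by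
        simp only [mCount, if_neg (show ¬ (maxS - t ≤ 0) by omega)]
        congr 1
        ring_nf
      rw [hmc]
      simp only [List.take_succ_cons, List.append_assoc, List.singleton_append, Prod.mk.injEq]
      refine ⟨by simp, by push_cast; omega⟩

-- A's loop runs straight through a window whose total stays below the threshold
lemma wgLoop_pass (chunks : List (List Int)) (maxS n : Int) (w : List (List Int)) :
    ∀ (fuel : Nat) (acc : List (List Int)) (t i : Int),
    w.length ≤ fuel →
    (∀ (k : Nat), (hk : k < w.length) → PySem.List.pyGet? chunks (i + (k : Int)) = some w[k]) →
    t + sumLen w < maxS → i + (w.length : Int) ≤ 0 → 0 < n →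
    wgLoop chunks maxS n fuel acc t i =
      wgLoop chunks maxS n (fuel - w.length) (acc ++ w) (t + sumLen w) (i + (w.length : Int)) := by
  induction w with
  | nil => intro fuel acc t i _ _ _ _ _; simp [sumLen_nil]
  | cons c w ih =>
    intro fuel acc t i hf hget hsum hi hn
    obtain ⟨fuel, rfl⟩ : ∃ f, fuel = f + 1 := by
      cases fuel with
      | zero => simp at hf
      | succ f => exact ⟨f, rfl⟩
    have hw := sumLen_nonneg w
    rw [sumLen_cons] at hsum
    have hc : PySem.List.pyGet? chunks i = some c := by
      have := hget 0 (by simp)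
      simpa using this
    have hi' : i < n := by simp only [List.length_cons] at hi; push_cast at hi; omega
    rw [wgLoop, if_pos ⟨by omega, hi'⟩, hc]
    show wgLoop chunks maxS n fuel (acc ++ [c]) (t + (c.length : Int)) (i + 1) = _
    rw [ih fuel (acc ++ [c]) (t + (c.length : Int)) (i + 1)
      (by simp at hf ⊢; omega)
      (by
        intro k hk
        have := hget (k + 1) (by simp; omega)
        push_cast at this ⊢
        rw [show i + 1 + (k : Int) = i + ((k : Int) + 1) by ring]
        simpa using this)
      (by omega)
      (by simp only [List.length_cons] at hi; push_cast at hi ⊢; omega)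
      hn]
    have e1 : fuel + 1 - (c :: w).length = fuel - w.length := by simp
    have e2 : acc ++ c :: w = (acc ++ [c]) ++ w := by simp
    have e3 : t + sumLen (c :: w) = (t + (c.length : Int)) + sumLen w := by rw [sumLen_cons]; ring
    have e4 : i + ((c :: w).length : Int) = (i + 1) + (w.length : Int) := by
      simp only [List.length_cons]
      push_cast
      ring
    rw [e1, e2, e3, e4]

lemma wgLoop_snd_ge (chunks : List (List Int)) (maxS n : Int) :
    ∀ (fuel : Nat) (acc : List (List Int)) (t i : Int), i ≤ (wgLoop chunks maxS n fuel acc t i).2 := by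
  intro fuel
  induction fuel with
  | zero => intro acc t i; simp [wgLoop]
  | succ f ih =>
    intro acc t i
    rw [wgLoop]
    split
    · cases hg : PySem.List.pyGet? chunks i with
      | some c =>
        show i ≤ (wgLoop chunks maxS n f (acc ++ [c]) (t + (c.length : Int)) (i + 1)).2
        have := ih (acc ++ [c]) (t + (c.length : Int)) (i + 1)
        omega
      | none => simp
    · simp

-- the window (as slice and as drop) for in-range negative starting index
lemma slice_neg (chunks : List (List Int)) {s : Int} (h1 : -(chunks.length : Int) ≤ s) (h2 : s < 0) :
    PySem.List.slice chunks (some s) none = chunks.drop (((chunks.length : Int) + s).toNat) := by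
  have hk : s = -(((-s).toNat : Nat) : Int) := by omega
  rw [hk, PySem.List.slice_from_neg_natCast chunks (-s).toNat (by omega)]
  congr 1
  omega

-- ===== VERDICT (by name: the statement is the Claim_ definition above) =====
theorem workload_grouping_spec : Claim_unchanged_workload_grouping := by
  intro chunks maxS s _hDom hPre hnD
  rw [alt_eq]
  unfold workload_grouping
  by_cases hM : maxS ≤ 0
  · -- threshold already met: both return ([], s)
    have h0 : mCount (PySem.List.slice chunks (some s) none) maxS = 0 := mCount_nonpos _ hM
    rw [h0]
    have hguard : ¬ ((0:Int) < maxS ∧ s < (chunks.length : Int)) := by omega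
    cases hfe : (((chunks.length : Int) - s).toNat) <;> simp [wgLoop, hguard]
  · by_cases hs : 0 ≤ s
    · by_cases hsn : s < (chunks.length : Int)
      · -- 0 ≤ s < n : window = drop s.toNat
        have hw : PySem.List.slice chunks (some s) none = chunks.drop s.toNat :=
          PySem.List.slice_from chunks hs
        set w := chunks.drop s.toNat with hwdef
        have hwlen : (w.length : Int) = (chunks.length : Int) - s := by
          simp [hwdef]; omega
        rw [hw]
        rw [wgLoop_eq chunks maxS (chunks.length : Int) w (((chunks.length : Int) - s).toNat) [] 0 s
          (by omega)
          (by
            intro k hk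
            have hik : (0:Int) ≤ s + (k : Int) := by omega
            have hik2 : s + (k : Int) < (chunks.length : Int) := by omega
            rw [PySem.List.pyGet?_eq_some_getElem chunks hik hik2]
            rw [← List.getElem?_eq_getElem (show (s + (k : Int)).toNat < chunks.length by omega),
                ← List.getElem?_eq_getElem hk]
            simp only [hwdef]
            rw [List.getElem?_drop]
            congr 1
            omega)
          (Or.inl (by omega))]
        rw [show maxS - 0 = maxS by ring]
        simp
      · -- s ≥ n : loop does not run, window is empty
        have hw : PySem.List.slice chunks (some s) none = [] := by
          rw [PySem.List.slice_from chunks hs]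
          apply List.drop_eq_nil_of_le
          omega
        rw [hw]
        have hfe : (((chunks.length : Int) - s).toNat) = 0 := by omega
        rw [hfe]
        simp [wgLoop, mCount]
    · -- -n ≤ s < 0, outside D_: threshold reached inside the tail
      have hsn : -(chunks.length : Int) ≤ s := by
        unfold Pre_workload_grouping at hPre
        omega
      have hw := slice_neg chunks hsn (by omega)
      set w := chunks.drop (((chunks.length : Int) + s).toNat) with hwdef
      have hwlen : (w.length : Int) = -s := by
        simp [hwdef]; omega
      have hDsum : maxS ≤ sumLen w := by
        unfold D_workload_grouping at hnD
        by_contra hlt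
        exact hnD ⟨hsn, by omega, by rw [← hwdef]; omega⟩
      rw [hw]
      rw [wgLoop_eq chunks maxS (chunks.length : Int) w (((chunks.length : Int) - s).toNat) [] 0 s
        (by omega)
        (by
          intro k hk
          have h2 : s + (k : Int) < 0 := by omega
          have hkk : s + (k : Int) = -((( -(s + (k:Int))).toNat : Nat) : Int) := by omega
          rw [hkk, PySem.List.pyGet?_neg_natCast chunks _ (by omega) (by omega)]
          rw [← List.getElem?_eq_getElem hk]
          simp only [hwdef]
          rw [List.getElem?_drop]
          congr 1
          omega)
        (Or.inr ⟨by omega, by omega, by omega⟩)]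
      rw [show maxS - 0 = maxS by ring]
      simp

theorem workload_grouping_changed : Claim_changed_workload_grouping := by
  unfold Claim_changed_workload_grouping; decide

theorem workload_grouping_tight : Claim_exact_workload_grouping := by
  intro chunks maxS s _hDom _hPre hD
  obtain ⟨h1, h2, h3⟩ := hD
  have hn : 0 < (chunks.length : Int) := by omega
  set w := chunks.drop (((chunks.length : Int) + s).toNat) with hwdef
  have hwlen : (w.length : Int) = -s := by
    simp [hwdef]; omega
  have hM : 0 < maxS := by have := sumLen_nonneg w; omega
  -- B's second component is 0
  have hB : (workload_grouping_alt chunks maxS s).2 = 0 := by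
    rw [alt_eq]
    rw [slice_neg chunks h1 h2, ← hwdef]
    rw [mCount_full w h3]
    simp
    omega
  -- A's second component is ≥ 1
  have hA : 1 ≤ (workload_grouping chunks maxS s).2 := by
    unfold workload_grouping
    rw [wgLoop_pass chunks maxS (chunks.length : Int) w (((chunks.length : Int) - s).toNat) [] 0 s
      (by omega)
      (by
        intro k hk
        have hkk : s + (k : Int) = -((( -(s + (k:Int))).toNat : Nat) : Int) := by omega
        rw [hkk, PySem.List.pyGet?_neg_natCast chunks _ (by omega) (by omega)]
        rw [← List.getElem?_eq_getElem hk]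
        simp only [hwdef]
        rw [List.getElem?_drop]
        congr 1
        omega)
      (by omega) (by omega) hn]
    obtain ⟨f, hf⟩ : ∃ f, (((chunks.length : Int) - s).toNat - w.length) = f + 1 :=
      ⟨((chunks.length : Int) - s).toNat - w.length - 1, by omega⟩
    rw [hf]
    rw [show s + (w.length : Int) = 0 by omega]
    rw [wgLoop, if_pos ⟨by omega, hn⟩]
    have hc0 : ∃ c, PySem.List.pyGet? chunks 0 = some c := by
      rw [PySem.List.pyGet?_zero]
      have : chunks ≠ [] := by intro h; simp [h] at hn
      cases chunks with
      | nil => simp at this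
      | cons a l => exact ⟨a, by simp⟩
    obtain ⟨c, hc⟩ := hc0
    rw [hc]
    show 1 ≤ (wgLoop chunks maxS (chunks.length : Int) f ([] ++ w ++ [c]) (0 + sumLen w + (c.length : Int)) (0 + 1)).2
    have := wgLoop_snd_ge chunks maxS (chunks.length : Int) f ([] ++ w ++ [c]) (0 + sumLen w + (c.length : Int)) (0 + 1)
    omega
  intro heq
  rw [heq] at hA
  omega
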